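-- pv_equiv track=rewrite | github.com/no-hi/GA_facility_optimizer | python_optimation/GA_cost2D_combinecheck.py | are_equal_3d_lists
-- ===== SOURCE A (Python) =====
-- def are_equal_3d_lists(list1, list2):
--     if len(list1) != len(list2):
--         return False
--     for i in range(len(list1)):
--         if len(list1[i]) != len(list2[i]):
--             return False
--         for j in range(len(list1[i])):
--             if len(list1[i][j]) != len(list2[i][j]):
--                 return False
--             for k in range(len(list1[i][j])):
--                 if list1[i][j][k] != list2[i][j][k]:
--                     return False
--     return True
-- ===== SOURCE B (Python) =====
-- def are_equal_3d_lists(list1, list2):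
--     return list1 == list2
-- ===== Notes on version B (the rewrite author's own statement) =====
-- stated objective: idiomatic
-- what changed: Replaces the hand-written triple index loop with length checks by Python's built-in structural list equality, which is the exact same relation on proper 3D int lists.
import Mathlib
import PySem

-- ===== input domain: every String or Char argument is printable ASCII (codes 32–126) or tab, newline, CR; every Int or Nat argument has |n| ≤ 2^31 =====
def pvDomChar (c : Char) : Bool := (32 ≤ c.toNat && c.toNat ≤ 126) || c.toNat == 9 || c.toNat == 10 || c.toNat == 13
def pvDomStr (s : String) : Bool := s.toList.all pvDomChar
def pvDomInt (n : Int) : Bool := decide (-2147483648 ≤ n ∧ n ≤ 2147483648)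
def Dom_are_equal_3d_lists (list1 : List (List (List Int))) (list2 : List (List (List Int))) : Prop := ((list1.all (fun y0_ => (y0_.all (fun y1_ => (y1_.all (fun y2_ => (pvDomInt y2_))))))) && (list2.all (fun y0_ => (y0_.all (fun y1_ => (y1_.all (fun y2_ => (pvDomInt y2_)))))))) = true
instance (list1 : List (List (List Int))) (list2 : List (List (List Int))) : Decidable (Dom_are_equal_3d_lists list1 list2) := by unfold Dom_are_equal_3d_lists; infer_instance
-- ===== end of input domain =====

-- B replaces A's hand-written triple index loop by the built-in structural list
-- equality (Python `==`), the idiomatic way to compare nested lists; same O(n) work.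

-- ===== PORT A =====
-- A's `for i in range(len(..))` loops with early `return False` are ported as
-- index recursion `pvIdxLoop p a b k`: runs k = 0,1,… while the per-element check
-- p holds, returns false at the first failure, true past the end.
def pvIdxLoop {α : Type} [Inhabited α] (p : α → α → Bool) (a b : List α) (k : Nat) : Bool :=
  if _h : k < a.length then
    if p (a.getD k default) (b.getD k default) then pvIdxLoop p a b (k + 1) else false
  else true
termination_by a.length - k

def are_equal_3d_lists (list1 : List (List (List Int))) (list2 : List (List (List Int))) : Bool :=
  if list1.length ≠ list2.length then false
  else
    pvIdxLoop (fun x1 x2 =>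
      if x1.length ≠ x2.length then false
      else
        pvIdxLoop (fun y1 y2 =>
          if y1.length ≠ y2.length then false
          else
            pvIdxLoop (fun z1 z2 => z1 == z2) y1 y2 0) x1 x2 0) list1 list2 0

-- ===== PORT B =====
def are_equal_3d_lists_alt (list1 : List (List (List Int))) (list2 : List (List (List Int))) : Bool :=
  list1 == list2

-- ===== PRECONDITION & SPEC =====
def Spec_are_equal_3d_lists (list1 : List (List (List Int))) (list2 : List (List (List Int))) (out : Bool) : Prop := out = are_equal_3d_lists_alt list1 list2
instance (list1 : List (List (List Int))) (list2 : List (List (List Int))) (out : Bool) : Decidable (Spec_are_equal_3d_lists list1 list2 out) := by unfold Spec_are_equal_3d_lists; infer_instance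

-- ===== CLAIM (what is proved, stated in full; the proofs are below) =====
def Claim_equal_are_equal_3d_lists : Prop := ∀ (list1 : List (List (List Int))) (list2 : List (List (List Int))), Dom_are_equal_3d_lists list1 list2 → Spec_are_equal_3d_lists list1 list2 (are_equal_3d_lists list1 list2)

-- ===== LEMMAS AND PROOFS =====

-- The index loop with an elementwise-equality check decides equality of the drops.
theorem pvIdxLoop_eq {α : Type} [Inhabited α] [BEq α] [LawfulBEq α]
    (p : α → α → Bool) (hp : ∀ x y, p x y = (x == y))
    (a b : List α) (hlen : a.length = b.length) :
    ∀ k, pvIdxLoop p a b k = (a.drop k == b.drop k) := by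
  intro k
  induction hn : a.length - k using Nat.strong_induction_on generalizing k with
  | _ n ih =>
    unfold pvIdxLoop
    by_cases hk : k < a.length
    · have hkb : k < b.length := hlen ▸ hk
      rw [dif_pos hk, List.getD_eq_getElem a default hk, List.getD_eq_getElem b default hkb,
        List.drop_eq_getElem_cons hk, List.drop_eq_getElem_cons hkb, hp,
        List.cons_beq_cons]
      by_cases he : a[k] = b[k]
      · have hrec : pvIdxLoop p a b (k + 1) = (a.drop (k+1) == b.drop (k+1)) :=
          ih (a.length - (k+1)) (by omega) (k+1) rfl
        rw [if_pos (beq_iff_eq.mpr he), hrec, beq_iff_eq.mpr he, Bool.true_and]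
      · rw [if_neg (by simp [he]), beq_eq_false_iff_ne.mpr he, Bool.false_and]
    · rw [dif_neg hk]
      have h1 : a.drop k = [] := List.drop_eq_nil_of_le (by omega)
      have h2 : b.drop k = [] := List.drop_eq_nil_of_le (by omega)
      simp [h1, h2]

-- A length-check-then-loop level computes BEq on lists.
theorem pvLevel_eq {α : Type} [Inhabited α] [BEq α] [LawfulBEq α]
    (p : α → α → Bool) (hp : ∀ x y, p x y = (x == y)) :
    ∀ x y : List α,
      (if x.length ≠ y.length then false else pvIdxLoop p x y 0) = (x == y) := by
  intro x y
  by_cases hl : x.length = y.length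
  · have := pvIdxLoop_eq p hp x y hl 0
    simp [hl, this]
  · have : x ≠ y := fun h => hl (by rw [h])
    simp [hl, beq_eq_false_iff_ne.mpr this]

-- ===== VERDICT (by name: the statement is the Claim_ definition above) =====
theorem are_equal_3d_lists_spec : Claim_equal_are_equal_3d_lists := by
  intro list1 list2 _
  show are_equal_3d_lists list1 list2 = are_equal_3d_lists_alt list1 list2
  unfold are_equal_3d_lists are_equal_3d_lists_alt
  have h2 : ∀ y1 y2 : List Int,
      (if y1.length ≠ y2.length then false else pvIdxLoop (fun z1 z2 => z1 == z2) y1 y2 0)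
        = (y1 == y2) :=
    pvLevel_eq _ (fun _ _ => rfl)
  have h1 : ∀ x1 x2 : List (List Int),
      (if x1.length ≠ x2.length then false
       else pvIdxLoop (fun y1 y2 =>
         if y1.length ≠ y2.length then false
         else pvIdxLoop (fun z1 z2 => z1 == z2) y1 y2 0) x1 x2 0) = (x1 == x2) :=
    pvLevel_eq _ h2
  exact pvLevel_eq _ h1 list1 list2
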